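-- pv_equiv track=rewrite | github.com/mage-ai/mage-ai | mage_ai/data/tabular/reader.py | partition_from_path
-- ===== SOURCE A (Python) =====
-- from typing import Any, AsyncGenerator, Dict, Generator, List, Optional, Tuple, Union
--
-- def partition_from_path(file_path: str) -> Optional[Dict[str, str]]:
--     """
--     Extracts partition key-value pairs from a given Parquet file path.
--     :param file_path: The full path to a Parquet file.
--     :return: A dictionary with partition key-value pairs if any exist in the path.
--     """
--     partition_info = {}
--
--     # Split the path into segments
--     path_segments = file_path.split('/')
--
--     # Iterate over each segment to find partitions (<key>=<value>)
--     for segment in path_segments: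
--         if '=' in segment:
--             key, value = segment.split('=', 1)
--             partition_info[key] = value
--
--     return partition_info if partition_info else None
-- ===== SOURCE B (Python) =====
-- from typing import Dict, Optional
--
--
-- def partition_from_path(file_path: str) -> Optional[Dict[str, str]]:
--     """Single character-level pass: no split() calls, one state machine over the path."""
--     partition_info = {}
--     key, value = [], []
--     has_eq = False
--     for ch in file_path:
--         if ch == '/':
--             if has_eq:
--                 partition_info[''.join(key)] = ''.join(value)
--             key, value = [], []
--             has_eq = False
--         elif ch == '=' and not has_eq:
--             has_eq = True
--         elif has_eq:
--             value.append(ch)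
--         else:
--             key.append(ch)
--     if has_eq:
--         partition_info[''.join(key)] = ''.join(value)
--     return partition_info if partition_info else None
-- ===== Notes on version B (the rewrite author's own statement) =====
-- stated objective: alternative
-- what changed: Replaces the two-level decomposition (split the path into segments, then split each segment once at its first separator) with a single character-level state machine over the path that builds each key and value in place and flushes at segment boundaries.
import Mathlib
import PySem

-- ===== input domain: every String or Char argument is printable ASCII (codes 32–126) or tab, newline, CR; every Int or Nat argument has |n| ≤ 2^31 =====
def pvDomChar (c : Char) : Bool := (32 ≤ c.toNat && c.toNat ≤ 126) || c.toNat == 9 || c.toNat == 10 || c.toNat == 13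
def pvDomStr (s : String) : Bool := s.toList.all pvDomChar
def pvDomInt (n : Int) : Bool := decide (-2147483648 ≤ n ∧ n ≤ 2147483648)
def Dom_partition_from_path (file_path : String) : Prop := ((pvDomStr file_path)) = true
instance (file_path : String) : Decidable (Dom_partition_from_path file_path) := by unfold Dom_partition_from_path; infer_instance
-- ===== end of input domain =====

-- B replaces the split('/') pass plus per-segment split('=',1) with a single
-- character-level state machine over the path (alternative decomposition, same cost).


-- ===== PORT A =====
def partition_from_path (file_path : String) : Option (List (String × String)) :=
  let path_segments := PySem.Chars.splitOn file_path.toList ['/']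
  let partition_info : PySem.Dict String String :=
    path_segments.foldl (fun d segment =>
      if PySem.Chars.isIn ['='] segment then
        match PySem.Chars.splitOnMax segment ['='] 1 with
        | [key, value] => d.insert (String.ofList key) (String.ofList value)
        | _ => d
      else d) PySem.Dict.empty
  if partition_info.items.isEmpty then none else some partition_info.items

-- ===== PORT B =====
-- one step of B's state machine: state = (dict so far, key chars, value chars, '=' seen)
def pvStep (st : PySem.Dict String String × List Char × List Char × Bool) (ch : Char) :
    PySem.Dict String String × List Char × List Char × Bool :=
  match st with
  | (d, key, val, hasEq) =>
    if ch = '/' then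
      ((if hasEq then d.insert (String.ofList key) (String.ofList val) else d), [], [], false)
    else if ch = '=' ∧ hasEq = false then (d, key, val, true)
    else if hasEq then (d, key, val ++ [ch], true)
    else (d, key ++ [ch], val, false)

def partition_from_path_alt (file_path : String) : Option (List (String × String)) :=
  match file_path.toList.foldl pvStep (PySem.Dict.empty, [], [], false) with
  | (d, key, val, hasEq) =>
    let d := if hasEq then d.insert (String.ofList key) (String.ofList val) else d
    if d.items.isEmpty then none else some d.items

-- ===== PRECONDITION & SPEC =====
def Spec_partition_from_path (file_path : String) (out : Option (List (String × String))) : Prop := out = partition_from_path_alt file_path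
instance (file_path : String) (out : Option (List (String × String))) : Decidable (Spec_partition_from_path file_path out) := by unfold Spec_partition_from_path; infer_instance

-- ===== CLAIM (what is proved, stated in full; the proofs are below) =====
def Claim_equal_partition_from_path : Prop := ∀ (file_path : String), Dom_partition_from_path file_path → Spec_partition_from_path file_path (partition_from_path file_path)

-- ===== LEMMAS AND PROOFS =====

-- prepend a prefix onto the first block of a block list
def pvConsHead (p : List Char) : List (List Char) → List (List Char)
  | [] => [p]
  | s :: ss => (p ++ s) :: ss

-- structural form of split('/') on a char list
def pvSplitC : List Char → List (List Char)
  | [] => [[]]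
  | c :: rest => if c = '/' then [] :: pvSplitC rest else pvConsHead [c] (pvSplitC rest)

-- what A does with one segment, in first-'='-decomposition form
def pvProcSeg (d : PySem.Dict String String) (seg : List Char) : PySem.Dict String String :=
  if seg.contains '=' then
    d.insert (String.ofList (seg.takeWhile (· ≠ '='))) (String.ofList ((seg.dropWhile (· ≠ '=')).tail))
  else d

theorem pvSplitC_ne_nil (l : List Char) : pvSplitC l ≠ [] := by
  cases l with
  | nil => simp [pvSplitC]
  | cons c rest =>
    simp only [pvSplitC]
    split
    · simp
    · cases h : pvSplitC rest <;> simp [pvConsHead]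

theorem pvConsHead_nil (ss : List (List Char)) (h : ss ≠ []) : pvConsHead [] ss = ss := by
  cases ss with
  | nil => exact absurd rfl h
  | cons s t => simp [pvConsHead]

theorem pvConsHead_consHead (p q : List Char) (ss : List (List Char)) :
    pvConsHead p (pvConsHead q ss) = pvConsHead (p ++ q) ss := by
  cases ss <;> simp [pvConsHead]

theorem pvSplitOn_go_eq (l : List Char) : ∀ (fuel : Nat) (cur : List Char) (acc : List (List Char)),
    l.length < fuel →
    PySem.Chars.splitOn.go ['/'] fuel l cur acc = acc.reverse ++ pvConsHead cur.reverse (pvSplitC l) := by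
  induction l with
  | nil =>
    intro fuel cur acc hf
    cases fuel with
    | zero => omega
    | succ n => simp [PySem.Chars.splitOn.go, pvSplitC, pvConsHead]
  | cons c rest ih =>
    intro fuel cur acc hf
    cases fuel with
    | zero => omega
    | succ n =>
      by_cases hc : c = '/'
      · subst hc
        rw [show PySem.Chars.splitOn.go ['/'] (n+1) ('/' :: rest) cur acc
              = PySem.Chars.splitOn.go ['/'] n rest [] (cur.reverse :: acc) by
            simp [PySem.Chars.splitOn.go, List.isPrefixOf]]
        rw [ih n [] (cur.reverse :: acc) (by simpa using hf)]
        cases h : pvSplitC rest with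
        | nil => exact absurd h (pvSplitC_ne_nil rest)
        | cons s ss => simp [pvSplitC, h, pvConsHead]
      · have hc' : ¬('/' = c) := fun h => hc h.symm
        rw [show PySem.Chars.splitOn.go ['/'] (n+1) (c :: rest) cur acc
              = PySem.Chars.splitOn.go ['/'] n rest (c :: cur) acc by
            simp [PySem.Chars.splitOn.go, List.isPrefixOf, hc']]
        rw [ih n (c :: cur) acc (by simpa using hf)]
        simp only [pvSplitC, if_neg hc]
        rw [pvConsHead_consHead]
        simp

theorem pvSplitOn_eq (cs : List Char) : PySem.Chars.splitOn cs ['/'] = pvSplitC cs := by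
  have := pvSplitOn_go_eq cs (cs.length + 1) [] [] (by omega)
  simpa [PySem.Chars.splitOn, pvConsHead_nil _ (pvSplitC_ne_nil cs)] using this

theorem pvGoMax0 (sep l cur : List Char) (acc : List (List Char)) (fuel : Nat) :
    PySem.Chars.splitOnMax.go sep fuel 0 l cur acc = acc.reverse ++ [cur.reverse ++ l] := by
  cases fuel with
  | zero => simp [PySem.Chars.splitOnMax.go]
  | succ n => cases l <;> simp [PySem.Chars.splitOnMax.go]

theorem pvGoMax1 (l : List Char) : ∀ (fuel : Nat) (cur : List Char) (acc : List (List Char)),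
    l.length < fuel → '=' ∈ l →
    PySem.Chars.splitOnMax.go ['='] fuel 1 l cur acc =
      acc.reverse ++ [cur.reverse ++ l.takeWhile (· ≠ '='), (l.dropWhile (· ≠ '=')).tail] := by
  induction l with
  | nil => intro _ _ _ _ hm; simp at hm
  | cons c rest ih =>
    intro fuel cur acc hf hm
    cases fuel with
    | zero => omega
    | succ n =>
      by_cases hc : c = '='
      · subst hc
        rw [show PySem.Chars.splitOnMax.go ['='] (n+1) 1 ('=' :: rest) cur acc
              = PySem.Chars.splitOnMax.go ['='] n 0 rest [] (cur.reverse :: acc) by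
            simp [PySem.Chars.splitOnMax.go, List.isPrefixOf]]
        rw [pvGoMax0]
        simp [List.takeWhile, List.dropWhile]
      · have hc' : ¬('=' = c) := fun h => hc h.symm
        rw [show PySem.Chars.splitOnMax.go ['='] (n+1) 1 (c :: rest) cur acc
              = PySem.Chars.splitOnMax.go ['='] n 1 rest (c :: cur) acc by
            simp [PySem.Chars.splitOnMax.go, List.isPrefixOf, hc']]
        have hm' : '=' ∈ rest := by cases hm with
          | head => exact absurd rfl hc
          | tail _ h => exact h
        rw [ih n (c :: cur) acc (by simpa using hf) hm']
        simp [List.takeWhile, List.dropWhile, hc]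

theorem pvSplitMax_eq (seg : List Char) (hm : '=' ∈ seg) :
    PySem.Chars.splitOnMax seg ['='] 1 =
      [seg.takeWhile (· ≠ '='), (seg.dropWhile (· ≠ '=')).tail] := by
  have h1 : ¬ ((1 : Int) < 0) := by norm_num
  simp only [PySem.Chars.splitOnMax, if_neg h1]
  have := pvGoMax1 seg (seg.length + 1) [] [] (by omega) hm
  simpa using this

theorem pvIsIn_eq (seg : List Char) : PySem.Chars.isIn ['='] seg = seg.contains '=' := by
  by_cases h : '=' ∈ seg
  · have hinf : (['='] : List Char) <:+: seg := by
      obtain ⟨s, t, rfl⟩ := List.append_of_mem h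
      exact ⟨s, t, by simp⟩
    rw [(PySem.Chars.isIn_iff_infix ['='] seg).mpr hinf]
    simp [h]
  · have hninf : ¬ (['='] : List Char) <:+: seg := fun hi => h (List.singleton_sublist.mp hi.sublist)
    rw [(PySem.Chars.isIn_eq_false_iff ['='] seg).mpr hninf]
    simp [h]

-- A's loop body equals pvProcSeg
theorem pvBody_eq (d : PySem.Dict String String) (seg : List Char) :
    (if PySem.Chars.isIn ['='] seg then
      match PySem.Chars.splitOnMax seg ['='] 1 with
      | [key, value] => d.insert (String.ofList key) (String.ofList value)
      | _ => d
     else d) = pvProcSeg d seg := by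
  rw [pvIsIn_eq]
  by_cases h : '=' ∈ seg
  · rw [pvSplitMax_eq seg h]
    simp [pvProcSeg, h]
  · simp [pvProcSeg, h, List.contains_eq_mem]

theorem pvFirstEq (key val : List Char) (hk : '=' ∉ key) :
    (key ++ '=' :: val).takeWhile (· ≠ '=') = key ∧
    (key ++ '=' :: val).dropWhile (· ≠ '=') = '=' :: val := by
  induction key with
  | nil =>
    rw [List.nil_append, List.takeWhile_cons, List.dropWhile_cons,
        if_neg (by simp), if_neg (by simp)]
    exact ⟨rfl, rfl⟩
  | cons c k ih =>
    have hc : c ≠ '=' := fun h => hk (h ▸ List.mem_cons_self)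
    have ih' := ih (fun h => hk (List.mem_cons_of_mem _ h))
    rw [List.cons_append, List.takeWhile_cons, List.dropWhile_cons,
        if_pos (by simp [hc]), if_pos (by simp [hc]), ih'.1, ih'.2]
    exact ⟨rfl, rfl⟩

-- the current partial segment B holds in its state
def pvSegPrefix (key val : List Char) (hasEq : Bool) : List Char :=
  if hasEq then key ++ '=' :: val else key

theorem pvFlush_eq (d : PySem.Dict String String) (key val : List Char) (hasEq : Bool)
    (hk : '=' ∉ key) :
    (if hasEq then d.insert (String.ofList key) (String.ofList val) else d) =
      pvProcSeg d (pvSegPrefix key val hasEq) := by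
  cases hasEq with
  | false =>
    simp [pvSegPrefix, pvProcSeg, List.contains_eq_mem, hk]
  | true =>
    have h := pvFirstEq key val hk
    have hm : '=' ∈ key ++ '=' :: val := by simp
    simp only [pvSegPrefix, if_true, pvProcSeg]
    rw [if_pos (by simp [List.contains_eq_mem, hm]), h.1, h.2]
    rfl

theorem pvInv (cs : List Char) : ∀ (d : PySem.Dict String String) (key val : List Char) (hasEq : Bool),
    '=' ∉ key → (hasEq = false → val = []) →
    (match cs.foldl pvStep (d, key, val, hasEq) with
     | (d', k', v', h') => if h' then d'.insert (String.ofList k') (String.ofList v') else d') =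
    (pvConsHead (pvSegPrefix key val hasEq) (pvSplitC cs)).foldl pvProcSeg d := by
  induction cs with
  | nil =>
    intro d key val hasEq hk _
    simp only [List.foldl_nil, pvSplitC, pvConsHead, List.foldl_cons, List.foldl_nil, List.append_nil]
    exact pvFlush_eq d key val hasEq hk
  | cons c rest ih =>
    intro d key val hasEq hk hv
    by_cases hc : c = '/'
    · subst hc
      rw [show List.foldl pvStep (d, key, val, hasEq) ('/' :: rest)
            = List.foldl pvStep
              ((if hasEq then d.insert (String.ofList key) (String.ofList val) else d), [], [], false) rest by
          simp [pvStep]]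
      rw [ih _ [] [] false (by simp) (fun _ => rfl)]
      rw [pvFlush_eq d key val hasEq hk]
      cases h : pvSplitC rest with
      | nil => exact absurd h (pvSplitC_ne_nil rest)
      | cons s ss => simp [pvSplitC, h, pvConsHead, pvSegPrefix]
    · have hsplit : pvSplitC (c :: rest) = pvConsHead [c] (pvSplitC rest) := by
        simp [pvSplitC, hc]
      by_cases he : c = '=' ∧ hasEq = false
      · obtain ⟨hce, hh⟩ := he
        subst hce; subst hh
        have hv0 : val = [] := hv rfl
        subst hv0
        rw [show List.foldl pvStep (d, key, [], false) ('=' :: rest)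
              = List.foldl pvStep (d, key, [], true) rest by simp [pvStep, hc]]
        rw [ih d key [] true hk (by simp)]
        rw [hsplit, pvConsHead_consHead]
        simp [pvSegPrefix]
      · cases hq : hasEq with
        | true =>
          rw [show List.foldl pvStep (d, key, val, true) (c :: rest)
                = List.foldl pvStep (d, key, val ++ [c], true) rest by
              simp [pvStep, hc]]
          rw [ih d key (val ++ [c]) true hk (by simp)]
          rw [hsplit, pvConsHead_consHead]
          simp [pvSegPrefix]
        | false =>
          have hcne : c ≠ '=' := fun h => he ⟨h, hq⟩
          have hknew : '=' ∉ key ++ [c] := by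
            intro h
            rcases List.mem_append.mp h with h1 | h1
            · exact hk h1
            · exact hcne (List.mem_singleton.mp h1).symm
          rw [show List.foldl pvStep (d, key, val, false) (c :: rest)
                = List.foldl pvStep (d, key ++ [c], val, false) rest by
              simp [pvStep, hc, hcne]]
          rw [ih d (key ++ [c]) val false hknew (fun _ => hv hq)]
          rw [hsplit, pvConsHead_consHead]
          simp [pvSegPrefix]

-- ===== VERDICT (by name: the statement is the Claim_ definition above) =====
theorem partition_from_path_spec : Claim_equal_partition_from_path := by
  intro file_path _
  unfold Spec_partition_from_path partition_from_path partition_from_path_alt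
  have hbody : (fun (d : PySem.Dict String String) segment =>
      if PySem.Chars.isIn ['='] segment then
        match PySem.Chars.splitOnMax segment ['='] 1 with
        | [key, value] => d.insert (String.ofList key) (String.ofList value)
        | _ => d
      else d) = pvProcSeg := by
    funext d seg
    exact pvBody_eq d seg
  rw [pvSplitOn_eq, hbody]
  have key := pvInv file_path.toList PySem.Dict.empty [] [] false (by simp) (fun _ => rfl)
  rw [show pvSegPrefix [] [] false = [] from rfl,
      pvConsHead_nil _ (pvSplitC_ne_nil file_path.toList)] at key
  cases hst : file_path.toList.foldl pvStep (PySem.Dict.empty, [], [], false) with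
  | mk d' rest =>
    obtain ⟨k', v', h'⟩ := rest
    rw [hst] at key
    simp only at key
    simp [← key]
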